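-- pv_equiv track=rewrite | github.com/hiroshinaka/comp4537termprj | model/suggestions/app.py | split_summary_and_bullets
-- ===== SOURCE A (Python) =====
-- def split_summary_and_bullets(text: str, bullets: int):
--     lines = text.splitlines()
--     summary_lines = []
--     bullet_lines = []
--     saw_bullet = False
--
--     for raw in lines:
--         if not raw.strip():
--             continue
--
--         if raw.lstrip().startswith(("-", "•", "*")):
--             saw_bullet = True
--             bullet_lines.append(raw.strip())
--         else:
--             if not saw_bullet:
--                 summary_lines.append(raw.strip())
--             else:
--                 bullet_lines.append("- " + raw.strip())
--
--     clean = [l.strip(" -*•") for l in bullet_lines][:bullets]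
--     summary = " ".join(summary_lines).strip()
--     return summary, clean
-- ===== SOURCE B (Python) =====
-- def split_summary_and_bullets(text: str, bullets: int):
--     nonblank = [l.strip() for l in text.splitlines() if l.strip()]
--     idx = next((i for i, l in enumerate(nonblank)
--                 if l.startswith(("-", "\u2022", "*"))), len(nonblank))
--     summary = " ".join(nonblank[:idx]).strip()
--     clean = [l.strip(" -*\u2022") for l in nonblank[idx:]][:bullets]
--     return summary, clean
-- ===== Notes on version B (the rewrite author's own statement) =====
-- stated objective: simpler
-- what changed: Replaces A's single stateful pass with a saw_bullet flag and conditional '- ' prefix injection by a locate-split-point decomposition: strip the nonblank lines once, find the index of the first bullet-starting line, join the prefix as the summary and strip-map the suffix as the bullets.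
import Mathlib
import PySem

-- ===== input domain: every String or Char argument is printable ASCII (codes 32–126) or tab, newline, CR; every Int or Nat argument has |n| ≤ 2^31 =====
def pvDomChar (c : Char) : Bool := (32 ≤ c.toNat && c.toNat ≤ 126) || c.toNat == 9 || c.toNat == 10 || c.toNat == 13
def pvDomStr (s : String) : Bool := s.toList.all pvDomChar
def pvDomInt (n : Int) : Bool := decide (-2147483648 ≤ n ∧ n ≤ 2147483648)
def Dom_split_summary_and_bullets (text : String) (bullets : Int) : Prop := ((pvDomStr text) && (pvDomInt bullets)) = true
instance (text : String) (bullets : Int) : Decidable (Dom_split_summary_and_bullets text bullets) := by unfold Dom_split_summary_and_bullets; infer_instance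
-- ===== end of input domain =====

-- B replaces A's stateful flag-driven single pass by a locate-the-first-bullet-line /
-- split / partition decomposition (simpler); return values agree on all inputs.

-- ===== PORT A =====
-- raw.lstrip().startswith(("-", "•", "*"))
def pvIsBulletA (raw : String) : Bool :=
  PySem.Str.startswith (PySem.Str.lstrip raw) "-" ||
  PySem.Str.startswith (PySem.Str.lstrip raw) "•" ||
  PySem.Str.startswith (PySem.Str.lstrip raw) "*"

-- one iteration of A's for-loop over (summary_lines, bullet_lines, saw_bullet)
def pvStepA (st : List String × List String × Bool) (raw : String) :
    List String × List String × Bool :=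
  if PySem.Str.strip raw == "" then st
  else if pvIsBulletA raw then (st.1, st.2.1 ++ [PySem.Str.strip raw], true)
  else if !st.2.2 then (st.1 ++ [PySem.Str.strip raw], st.2.1, st.2.2)
  else (st.1, st.2.1 ++ [PySem.Str.join "" ["- ", PySem.Str.strip raw]], st.2.2)

def split_summary_and_bullets (text : String) (bullets : Int) : String × List String :=
  let st := (PySem.Str.splitlines text).foldl pvStepA ([], [], false)
  (PySem.Str.strip (PySem.Str.join " " st.1),
   PySem.List.slice (st.2.1.map (fun l => PySem.Str.stripChars l " -*•")) none (some bullets))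

-- ===== PORT B =====
-- l.startswith(("-", "•", "*")) on an already-stripped line
def pvIsBulletB (l : String) : Bool :=
  PySem.Str.startswith l "-" || PySem.Str.startswith l "•" || PySem.Str.startswith l "*"

def split_summary_and_bullets_alt (text : String) (bullets : Int) : String × List String :=
  let nonblank := ((PySem.Str.splitlines text).filter
      (fun l => !(PySem.Str.strip l == ""))).map PySem.Str.strip
  let idx := nonblank.findIdx pvIsBulletB
  (PySem.Str.strip (PySem.Str.join " " (nonblank.take idx)),
   PySem.List.slice ((nonblank.drop idx).map (fun l => PySem.Str.stripChars l " -*•"))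
     none (some bullets))

-- ===== PRECONDITION & SPEC =====
def Spec_split_summary_and_bullets (text : String) (bullets : Int) (out : String × List String) : Prop := out = split_summary_and_bullets_alt text bullets
instance (text : String) (bullets : Int) (out : String × List String) : Decidable (Spec_split_summary_and_bullets text bullets out) := by unfold Spec_split_summary_and_bullets; infer_instance

-- ===== CLAIM (what is proved, stated in full; the proofs are below) =====
def Claim_equal_split_summary_and_bullets : Prop := ∀ (text : String) (bullets : Int), Dom_split_summary_and_bullets text bullets → Spec_split_summary_and_bullets text bullets (split_summary_and_bullets text bullets)

-- ===== LEMMAS AND PROOFS =====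

-- what A appends to bullet_lines for a (nonblank) line once saw_bullet holds or the line is a bullet
def pvMarkA (raw : String) : String :=
  if pvIsBulletA raw then PySem.Str.strip raw
  else PySem.Str.join "" ["- ", PySem.Str.strip raw]

def pvNonblank (l : String) : Bool := !(PySem.Str.strip l == "")

theorem pvStrEq (a b : String) (h : a.toList = b.toList) : a = b := by
  rw [← String.ofList_toList (s := a), ← String.ofList_toList (s := b), h]

-- stripping " -*•" erases A's injected "- " prefix
theorem pvStripChars_mark (raw : String) :
    PySem.Str.stripChars (pvMarkA raw) " -*•" =
    PySem.Str.stripChars (PySem.Str.strip raw) " -*•" := by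
  unfold pvMarkA
  split_ifs with h
  · rfl
  · apply pvStrEq
    simp only [PySem.Str.toList_stripChars, PySem.Str.toList_join]
    rw [show (["- ", PySem.Str.strip raw].map String.toList) =
        ["- ".toList, (PySem.Str.strip raw).toList] from rfl,
      PySem.Chars.join_cons_cons, PySem.Chars.join_singleton]
    simp [PySem.Chars.stripChars, List.dropWhile]

theorem pvStartswith_single (l : List Char) (c : Char) :
    PySem.Chars.startswith l [c] = true ↔ l.head? = some c := by
  rw [PySem.Chars.startswith_iff]
  cases l with
  | nil => simp
  | cons x xs =>
    constructor
    · rintro ⟨t, ht⟩; simp at ht; simp [ht.1]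
    · intro h; simp at h; exact ⟨xs, by simp [h]⟩

theorem pvStartswith_head (l : List Char) (c : Char) :
    PySem.Chars.startswith l [c] = decide (l.head? = some c) := by
  by_cases hx : l.head? = some c
  · simp [hx, (pvStartswith_single l c).mpr hx]
  · have hf : PySem.Chars.startswith l [c] = false := by
      cases hb : PySem.Chars.startswith l [c]
      · rfl
      · exact absurd ((pvStartswith_single l c).mp hb) hx
    simp [hf, hx]

theorem pvRstrip_prefix (l : List Char) : PySem.Chars.rstrip l <+: l := by
  have h := List.dropWhile_suffix (l := l.reverse) (p := PySem.Chars.isspace)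
  have h2 : (List.dropWhile PySem.Chars.isspace l.reverse).reverse <+: l.reverse.reverse :=
    List.reverse_prefix.mpr h
  rw [PySem.Chars.rstrip]
  simpa using h2

theorem pvHead_strip (raw : String) (h : ¬ (PySem.Str.strip raw == "") = true) :
    (PySem.Str.strip raw).toList.head? = (PySem.Str.lstrip raw).toList.head? := by
  have hne0 : PySem.Str.strip raw ≠ "" := by simpa using h
  have hne : (PySem.Str.strip raw).toList ≠ [] := fun hc => hne0 (pvStrEq _ _ (by simpa using hc))
  rw [PySem.Str.toList_strip, PySem.Str.toList_lstrip] at *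
  rw [PySem.Chars.strip] at *
  obtain ⟨t, ht⟩ := pvRstrip_prefix (PySem.Chars.lstrip raw.toList)
  cases hres : PySem.Chars.rstrip (PySem.Chars.lstrip raw.toList) with
  | nil => exact absurd hres hne
  | cons x xs =>
    rw [hres] at ht
    rw [← ht]
    simp

-- for a nonblank line, A's bullet test on lstrip agrees with B's on strip
theorem pvBullet_eq (raw : String) (h : ¬ (PySem.Str.strip raw == "") = true) :
    pvIsBulletA raw = pvIsBulletB (PySem.Str.strip raw) := by
  unfold pvIsBulletA pvIsBulletB
  rw [PySem.Str.startswith_eq, PySem.Str.startswith_eq, PySem.Str.startswith_eq,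
    PySem.Str.startswith_eq, PySem.Str.startswith_eq, PySem.Str.startswith_eq,
    show "-".toList = ['-'] by decide, show "•".toList = ['•'] by decide,
    show "*".toList = ['*'] by decide,
    pvStartswith_head, pvStartswith_head, pvStartswith_head,
    pvStartswith_head, pvStartswith_head, pvStartswith_head,
    pvHead_strip raw h]

-- once saw_bullet is true every remaining nonblank line is appended, marked, to bullet_lines
theorem pvFold_true (lines : List String) (S B : List String) :
    lines.foldl pvStepA (S, B, true) =
      (S, B ++ (lines.filter pvNonblank).map pvMarkA, true) := by
  induction lines generalizing B with
  | nil => simp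
  | cons raw rest ih =>
    by_cases h : (PySem.Str.strip raw == "") = true
    · simp [pvStepA, h, pvNonblank, ih]
    · by_cases hb : pvIsBulletA raw = true <;>
        simp [pvStepA, h, hb, pvNonblank, pvMarkA, ih]

-- the whole loop, from a clean bullet state, as B's partition at the first bullet line
theorem pvFold_main (lines : List String) (S : List String) :
    lines.foldl pvStepA (S, [], false) =
      (S ++ ((lines.filter pvNonblank).map PySem.Str.strip).take
          (((lines.filter pvNonblank).map PySem.Str.strip).findIdx pvIsBulletB),
       ((lines.filter pvNonblank).drop
          (((lines.filter pvNonblank).map PySem.Str.strip).findIdx pvIsBulletB)).map pvMarkA,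
       decide ((((lines.filter pvNonblank).map PySem.Str.strip).findIdx pvIsBulletB) <
          ((lines.filter pvNonblank).map PySem.Str.strip).length)) := by
  induction lines generalizing S with
  | nil => simp
  | cons raw rest ih =>
    by_cases h : (PySem.Str.strip raw == "") = true
    · have hstep : pvStepA (S, [], false) raw = (S, [], false) := by simp [pvStepA, h]
      rw [List.foldl_cons, hstep, ih]
      simp [pvNonblank, h]
    · have hbe := pvBullet_eq raw h
      by_cases hb : pvIsBulletA raw = true
      · have hbB : pvIsBulletB (PySem.Str.strip raw) = true := by rw [← hbe]; exact hb
        have hstep : pvStepA (S, [], false) raw = (S, [PySem.Str.strip raw], true) := by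
          simp [pvStepA, h, hb]
        rw [List.foldl_cons, hstep, pvFold_true]
        simp [pvNonblank, h, List.findIdx_cons, hbB, pvMarkA, hb]
      · have hbB : pvIsBulletB (PySem.Str.strip raw) = false := by
          rw [← hbe]; exact Bool.eq_false_iff.mpr hb
        have hstep : pvStepA (S, [], false) raw = (S ++ [PySem.Str.strip raw], [], false) := by
          simp [pvStepA, h, hb]
        rw [List.foldl_cons, hstep, ih]
        simp [pvNonblank, h, List.findIdx_cons, hbB]

-- ===== VERDICT (by name: the statement is the Claim_ definition above) =====
theorem split_summary_and_bullets_spec : Claim_equal_split_summary_and_bullets := by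
  intro text bullets _
  unfold Spec_split_summary_and_bullets split_summary_and_bullets split_summary_and_bullets_alt
  simp only []
  rw [show (fun l => !(PySem.Str.strip l == "")) = pvNonblank from rfl]
  rw [pvFold_main (PySem.Str.splitlines text) []]
  simp only [List.nil_append]
  refine Prod.ext rfl ?_
  simp only []
  congr 1
  rw [← List.map_drop, List.map_map, List.map_map]
  exact List.map_congr_left (fun raw _ => pvStripChars_mark raw)
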